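-- pv_equiv track=rewrite | github.com/Brandtweary/Cymbiont | src/text_parser.py | combine_headers
-- ===== SOURCE A (Python) =====
-- from typing import List, Optional
--
-- def is_header(text: str) -> bool:
--     """Determine if a paragraph is a header based on word count per line and ending."""
--     lines = [line.strip() for line in text.split('\n') if line.strip()]
--
--     # Not a header if too many lines
--     MAX_HEADER_LINES = 5
--     if len(lines) > MAX_HEADER_LINES:
--         return False
--
--     # Check each line individually
--     for line in lines:
--         if len(line.split()) >= 10 or (line.endswith('.') and not line.endswith('Ph.D.')):
--             return False
--
--     return True
--
-- def combine_headers(paragraphs: List[str]) -> List[str]: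
--     """Combine headers with their following paragraphs, preserving line breaks."""
--     result: List[str] = []
--     header_buffer: List[str] = []
--
--     for para in paragraphs:
--         if is_header(para):
--             header_buffer.append(para)
--         else:
--             if header_buffer:
--                 # Combine all headers with the current paragraph using line breaks
--                 result.append('\n'.join(header_buffer + [para]))
--                 header_buffer.clear()
--             else:
--                 result.append(para)
--
--     # Handle any remaining headers at the end of the text
--     if header_buffer:
--         result.append('\n'.join(header_buffer))
--
--     return result
-- ===== SOURCE B (Python) =====
-- from typing import List
--
--
-- def is_header(text: str) -> bool:
--     """Determine if a paragraph is a header based on word count per line and ending."""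
--     lines = [s for s in map(str.strip, text.split('\n')) if s]
--     return len(lines) <= 5 and all(
--         len(s.split()) < 10 and (not s.endswith('.') or s.endswith('Ph.D.'))
--         for s in lines
--     )
--
--
-- def combine_headers(paragraphs: List[str]) -> List[str]:
--     """Combine headers with their following paragraphs, preserving line breaks."""
--     # Phase 1: split into maximal consecutive runs sharing the same is_header value.
--     runs: List[tuple] = []
--     i = 0
--     n = len(paragraphs)
--     while i < n:
--         k = is_header(paragraphs[i])
--         j = i + 1
--         while j < n and is_header(paragraphs[j]) == k:
--             j += 1
--         runs.append((k, paragraphs[i:j]))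
--         i = j
--     # Phase 2: walk the runs; a header run is held and merged with the FIRST
--     # paragraph of the following non-header run; a trailing header run is flushed.
--     result: List[str] = []
--     held: List[str] = []
--     for k, run in runs:
--         if k:
--             held = run
--         elif held:
--             result.append('\n'.join(held + run[:1]))
--             result.extend(run[1:])
--             held = []
--         else:
--             result.extend(run)
--     if held:
--         result.append('\n'.join(held))
--     return result
-- ===== Notes on version B (the rewrite author's own statement) =====
-- stated objective: alternative
-- what changed: B first groups the paragraphs into maximal consecutive runs by is_header and then walks the runs, merging a held header run with the first paragraph of the following non-header run and flushing a trailing header run, instead of A's single pass with a mutable header buffer; B's is_header is a single boolean expression instead of A's early-return loop.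
import Mathlib
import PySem

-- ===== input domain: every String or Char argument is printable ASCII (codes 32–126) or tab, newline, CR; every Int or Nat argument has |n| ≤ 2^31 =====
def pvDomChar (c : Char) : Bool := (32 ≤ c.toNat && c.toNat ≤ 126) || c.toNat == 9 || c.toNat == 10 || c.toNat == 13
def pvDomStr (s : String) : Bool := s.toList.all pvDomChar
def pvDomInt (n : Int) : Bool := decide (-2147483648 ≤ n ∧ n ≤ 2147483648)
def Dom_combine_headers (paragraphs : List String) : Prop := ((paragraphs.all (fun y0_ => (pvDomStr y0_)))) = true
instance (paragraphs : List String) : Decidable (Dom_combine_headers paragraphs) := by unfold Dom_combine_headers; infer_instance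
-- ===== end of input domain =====

-- B groups the paragraphs into maximal consecutive runs by is_header and walks the
-- runs, merging a held header run with the first paragraph of the following
-- non-header run: a different decomposition (run-grouping) of the same task, same cost.

-- ===== PORT A =====
def is_header (text : String) : Bool :=
  let lines := (((PySem.Str.split? text "\n").getD []).map PySem.Str.strip).filter
      (fun l => l ≠ "")
  if lines.length > 5 then
    false
  else
    lines.all (fun line =>
      !(decide ((PySem.Str.split₀ line).length ≥ 10) ||
        (PySem.Str.endswith line "." && !PySem.Str.endswith line "Ph.D.")))

-- the body of A's for-loop, on the state (result, header_buffer)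
def stepA (st : List String × List String) (para : String) : List String × List String :=
  if is_header para then (st.1, st.2 ++ [para])
  else if st.2 ≠ [] then
    (st.1 ++ [PySem.Str.join "\n" (st.2 ++ [para])], [])
  else (st.1 ++ [para], [])

-- A's trailing "if header_buffer: result.append('\n'.join(header_buffer))"
def finishA (st : List String × List String) : List String :=
  if st.2 ≠ [] then st.1 ++ [PySem.Str.join "\n" st.2] else st.1

def combine_headers (paragraphs : List String) : List String :=
  finishA (paragraphs.foldl stepA ([], []))

-- ===== PORT B =====
def is_header_alt (text : String) : Bool :=
  let lines := (((PySem.Str.split? text "\n").getD []).map PySem.Str.strip).filter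
      (fun s => s ≠ "")
  decide (lines.length ≤ 5) && lines.all (fun s =>
    decide ((PySem.Str.split₀ s).length < 10) &&
      (!PySem.Str.endswith s "." || PySem.Str.endswith s "Ph.D."))

-- Phase 1 of B: split into maximal consecutive runs sharing the same is_header value.
def runsByHeader : List String → List (Bool × List String)
  | [] => []
  | p :: ps =>
      (is_header_alt p, p :: ps.takeWhile (fun q => is_header_alt q == is_header_alt p)) ::
        runsByHeader (ps.dropWhile (fun q => is_header_alt q == is_header_alt p))
  termination_by l => l.length
  decreasing_by
    simpa [Nat.lt_succ_iff] using List.length_dropWhile_le _ ps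

-- Phase 2 of B: walk the runs holding header runs, merging each with the first
-- paragraph of the following non-header run; flush a trailing header run.
def emitRuns : List String → List (Bool × List String) → List String
  | held, [] => if held ≠ [] then [PySem.Str.join "\n" held] else []
  | held, (k, run) :: gs =>
      if k then emitRuns run gs
      else if held ≠ [] then
        PySem.Str.join "\n" (held ++ run.take 1) :: (run.drop 1 ++ emitRuns [] gs)
      else run ++ emitRuns [] gs

def combine_headers_alt (paragraphs : List String) : List String :=
  emitRuns [] (runsByHeader paragraphs)

-- ===== PRECONDITION & SPEC =====
def Spec_combine_headers (paragraphs : List String) (out : List String) : Prop := out = combine_headers_alt paragraphs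
instance (paragraphs : List String) (out : List String) : Decidable (Spec_combine_headers paragraphs out) := by unfold Spec_combine_headers; infer_instance

-- ===== CLAIM (what is proved, stated in full; the proofs are below) =====
def Claim_equal_combine_headers : Prop := ∀ (paragraphs : List String), Dom_combine_headers paragraphs → Spec_combine_headers paragraphs (combine_headers paragraphs)

-- ===== LEMMAS AND PROOFS =====

theorem is_header_alt_eq (t : String) : is_header_alt t = is_header t := by
  unfold is_header is_header_alt
  set lines := (((PySem.Str.split? t "\n").getD []).map PySem.Str.strip).filter
      (fun l => l ≠ "") with hl
  by_cases h : lines.length > 5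
  · have h5 : ¬ lines.length ≤ 5 := by omega
    simp [h, h5]
  · have h5 : lines.length ≤ 5 := by omega
    have hfun : (fun s => decide ((PySem.Str.split₀ s).length < 10) &&
        (!PySem.Str.endswith s "." || PySem.Str.endswith s "Ph.D."))
        = (fun line => !(decide ((PySem.Str.split₀ line).length ≥ 10) ||
            (PySem.Str.endswith line "." && !PySem.Str.endswith line "Ph.D."))) := by
      funext s
      rcases Nat.lt_or_ge (PySem.Str.split₀ s).length 10 with h10 | h10
      · rw [decide_eq_true h10,
          decide_eq_false (by omega : ¬ (PySem.Str.split₀ s).length ≥ 10)]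
        cases PySem.Str.endswith s "." <;> cases PySem.Str.endswith s "Ph.D." <;> rfl
      · rw [decide_eq_false (by omega : ¬ (PySem.Str.split₀ s).length < 10),
          decide_eq_true h10]
        rfl
    rw [if_neg h]
    show (decide (lines.length ≤ 5) && lines.all _) = _
    rw [decide_eq_true h5, Bool.true_and]
    exact congrArg (List.all lines) hfun

-- "output of the remaining paragraphs given the pending header buffer"
def fAux : List String → List String → List String
  | [], buf => if buf ≠ [] then [PySem.Str.join "\n" buf] else []
  | p :: ps, buf =>
      if is_header_alt p then fAux ps (buf ++ [p])
      else (if buf ≠ [] then PySem.Str.join "\n" (buf ++ [p]) else p) :: fAux ps []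

theorem A_to_fAux (ps : List String) (res buf : List String) :
    finishA (ps.foldl stepA (res, buf)) = res ++ fAux ps buf := by
  induction ps generalizing res buf with
  | nil =>
    by_cases h : buf = [] <;> simp [fAux, finishA, h]
  | cons p ps ih =>
    rw [List.foldl_cons]
    cases h : is_header_alt p with
    | true =>
      have h' : is_header p = true := is_header_alt_eq p ▸ h
      rw [show stepA (res, buf) p = (res, buf ++ [p]) from by simp [stepA, h'],
        ih, fAux, if_pos h]
    | false =>
      have h' : is_header p = false := is_header_alt_eq p ▸ h
      by_cases hb : buf = []
      · rw [show stepA (res, buf) p = (res ++ [p], []) from by simp [stepA, h', hb],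
          ih, fAux, if_neg (by simp [h])]
        simp [hb]
      · rw [show stepA (res, buf) p = (res ++ [PySem.Str.join "\n" (buf ++ [p])], [])
            from by simp [stepA, h', hb],
          ih, fAux, if_neg (by simp [h])]
        simp [hb]

theorem fAux_headers (t : List String) (d buf : List String)
    (h : ∀ x ∈ t, is_header_alt x = true) :
    fAux (t ++ d) buf = fAux d (buf ++ t) := by
  induction t generalizing buf with
  | nil => simp
  | cons x t ih =>
    have hx : is_header_alt x = true := h x (by simp)
    rw [List.cons_append, fAux, if_pos hx, ih _ (fun y hy => h y (by simp [hy]))]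
    simp

theorem fAux_nonheaders (t : List String) (d : List String)
    (h : ∀ x ∈ t, is_header_alt x = false) :
    fAux (t ++ d) [] = t ++ fAux d [] := by
  induction t with
  | nil => simp
  | cons x t ih =>
    have hx : is_header_alt x = false := h x (by simp)
    rw [List.cons_append, fAux, if_neg (by simp [hx])]
    simp [ih (fun y hy => h y (by simp [hy]))]

theorem head?_dropWhile_false {α : Type} (p : α → Bool) (l : List α) (q : α)
    (h : (l.dropWhile p).head? = some q) : p q = false := by
  induction l with
  | nil => simp [List.dropWhile] at h
  | cons x l ih =>
    rw [List.dropWhile_cons] at h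
    split at h
    · exact ih h
    · simp at h
      subst h
      simpa using ‹¬ p x = true›

theorem emitRuns_header (held run : List String) (gs : List (Bool × List String)) :
    emitRuns held ((true, run) :: gs) = emitRuns run gs := by
  rw [emitRuns]
  simp

theorem emitRuns_nonheader (held run : List String) (gs : List (Bool × List String)) :
    emitRuns held ((false, run) :: gs) =
      if held ≠ [] then
        PySem.Str.join "\n" (held ++ run.take 1) :: (run.drop 1 ++ emitRuns [] gs)
      else run ++ emitRuns [] gs := by
  rw [emitRuns]
  simp

theorem B_to_fAux (n : Nat) : ∀ (ps held : List String), ps.length ≤ n →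
    (held = [] ∨ ∀ q, ps.head? = some q → is_header_alt q = false) →
    emitRuns held (runsByHeader ps) = fAux ps held := by
  induction n with
  | zero =>
    intro ps held hle h
    have : ps = [] := by
      cases ps with
      | nil => rfl
      | cons p tl => simp at hle
    subst this
    by_cases hb : held = [] <;> simp [runsByHeader, emitRuns, fAux, hb]
  | succ n ih =>
    intro ps held hle h
    cases ps with
    | nil => by_cases hb : held = [] <;> simp [runsByHeader, emitRuns, fAux, hb]
    | cons p tl =>
      have hletl : tl.length ≤ n := by simpa [Nat.succ_le_succ_iff] using hle
      cases hk : is_header_alt p with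
      | true =>
        rw [runsByHeader, hk]
        have hheld : held = [] := by
          rcases h with h | h
          · exact h
          · exact absurd (h p rfl) (by simp [hk])
        subst hheld
        rw [emitRuns_header]
        have hled : (tl.dropWhile (fun q => is_header_alt q == true)).length ≤ n :=
          le_trans (List.length_dropWhile_le _ tl) hletl
        rw [ih _ _ hled (Or.inr (fun q hq => by
          have := head?_dropWhile_false (fun q => is_header_alt q == true) tl q hq
          simpa using this))]
        rw [fAux, if_pos hk]
        have htt : ∀ x ∈ tl.takeWhile (fun q => is_header_alt q == true),
            is_header_alt x = true :=
          fun x hx => by simpa using List.mem_takeWhile_imp hx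
        have h2 : fAux tl ([] ++ [p]) =
            fAux (tl.dropWhile (fun q => is_header_alt q == true))
              (([] ++ [p]) ++ tl.takeWhile (fun q => is_header_alt q == true)) := by
          conv_lhs => rw [← List.takeWhile_append_dropWhile
            (p := fun q => is_header_alt q == true) (l := tl)]
          exact fAux_headers _ _ _ htt
        rw [h2]
        simp
      | false =>
        rw [runsByHeader, hk]
        rw [emitRuns_nonheader]
        have hled : (tl.dropWhile (fun q => is_header_alt q == false)).length ≤ n :=
          le_trans (List.length_dropWhile_le _ tl) hletl
        have hrec := ih _ [] hled (Or.inl rfl)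
        have htf : ∀ x ∈ tl.takeWhile (fun q => is_header_alt q == false),
            is_header_alt x = false :=
          fun x hx => by simpa using List.mem_takeWhile_imp hx
        have hsplit :
            fAux tl [] = tl.takeWhile (fun q => is_header_alt q == false) ++
              fAux (tl.dropWhile (fun q => is_header_alt q == false)) [] := by
          conv_lhs => rw [← List.takeWhile_append_dropWhile
            (p := fun q => is_header_alt q == false) (l := tl)]
          exact fAux_nonheaders _ _ htf
        by_cases hb : held = []
        · subst hb
          rw [if_neg (by simp), hrec, fAux, if_neg (by simp [hk]), if_neg (by simp),
            hsplit]
          simp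
        · rw [if_pos (by simpa using hb), hrec, fAux, if_neg (by simp [hk]),
            if_pos (by simpa using hb), hsplit]
          simp

-- ===== VERDICT (by name: the statement is the Claim_ definition above) =====
theorem combine_headers_spec : Claim_equal_combine_headers := by
  intro ps _
  unfold Spec_combine_headers combine_headers combine_headers_alt
  rw [B_to_fAux ps.length ps [] le_rfl (Or.inl rfl)]
  simpa using A_to_fAux ps [] []
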